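-- pv_equiv track=rewrite | github.com/VenkataHarshavardhan2832/PYTHONCOURSEWORK | class6/problems/question7.py | most_repeating_last
-- ===== SOURCE A (Python) =====
-- def most_repeating_last(s):
--     max_count = 0
--     result = ''
--     for ch in s:
--         count = s.count(ch)
--         if count > max_count or (count == max_count and s.rindex(ch) > s.rindex(result)):
--             max_count = count
--             result = ch
--     return result
-- ===== SOURCE B (Python) =====
-- def most_repeating_last(s):
--     # One pass to tabulate frequencies, then return the first character,
--     # scanning from the right, whose count equals the maximum count.
--     if not s:
--         return ''
--     freq = {}
--     for ch in s:
--         freq[ch] = freq.get(ch, 0) + 1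
--     m = max(freq.values())
--     for ch in reversed(s):
--         if freq[ch] == m:
--             return ch
-- ===== Notes on version B (the rewrite author's own statement) =====
-- stated objective: faster
-- what changed: A rescans the whole string (count + two rindex) for every character in a single best-so-far pass; B builds a frequency table in one pass, takes the max count, and returns the first character from the right whose count equals it (the rightmost max-count position realises A's latest-last-occurrence tie-break).
import Mathlib
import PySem

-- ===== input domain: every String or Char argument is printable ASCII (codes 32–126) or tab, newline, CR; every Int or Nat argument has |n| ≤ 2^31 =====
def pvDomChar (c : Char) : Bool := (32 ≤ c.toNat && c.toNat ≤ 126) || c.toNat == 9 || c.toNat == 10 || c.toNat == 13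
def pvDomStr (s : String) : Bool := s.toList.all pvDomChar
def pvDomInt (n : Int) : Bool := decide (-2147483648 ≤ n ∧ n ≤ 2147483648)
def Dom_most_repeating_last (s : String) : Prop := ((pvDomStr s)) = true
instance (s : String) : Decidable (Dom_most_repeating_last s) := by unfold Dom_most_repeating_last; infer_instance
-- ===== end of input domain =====

-- B replaces A's quadratic best-so-far pass (count + rindex rescans per character) by a
-- one-pass frequency table, max of the counts, and a reverse scan for the first character
-- with that count; same return value on every string.

-- ===== PORT A =====
-- Python's s.rindex is ported as PySem.Str.rfind: exact here because every needle A passes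
-- (a character of s, or the initial '' which rindex finds at len(s)) does occur in s.
-- pvStep is the body of A's for-loop: state = (max_count, result).
def pvStep (s : String) (st : Nat × String) (ch : Char) : Nat × String :=
  let count := PySem.Str.count s (String.ofList [ch])
  if count > st.1 || (count == st.1 &&
      decide (PySem.Str.rfind s (String.ofList [ch]) > PySem.Str.rfind s st.2)) then
    (count, String.ofList [ch])
  else st

def most_repeating_last (s : String) : String :=
  (s.toList.foldl (pvStep s) ((0 : Nat), "")).2

-- ===== PORT B =====
def most_repeating_last_alt (s : String) : String :=
  if s.toList.isEmpty then "" else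
  let freq := s.toList.foldl (fun d ch => d.insert ch (d.getD ch 0 + 1))
      (PySem.Dict.empty : PySem.Dict Char Int)
  match PySem.List.max? freq.values (fun v => v) with
  | none => ""   -- unreachable: freq is nonempty, so max? is some
  | some m =>
    match s.toList.reverse.find? (fun ch => freq.getD ch 0 == m) with
    | some ch => String.ofList [ch]
    | none => ""   -- unreachable: some character has the maximal count

-- ===== PRECONDITION & SPEC =====
def Spec_most_repeating_last (s : String) (out : String) : Prop := out = most_repeating_last_alt s
instance (s : String) (out : String) : Decidable (Spec_most_repeating_last s out) := by unfold Spec_most_repeating_last; infer_instance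

-- ===== CLAIM (what is proved, stated in full; the proofs are below) =====
def Claim_equal_most_repeating_last : Prop := ∀ (s : String), Dom_most_repeating_last s → Spec_most_repeating_last s (most_repeating_last s)

-- ===== LEMMAS AND PROOFS =====

-- `[c].isPrefixOf xs` tests the head
theorem pv_prefix_singleton (c : Char) (xs : List Char) :
    [c].isPrefixOf xs = true ↔ xs.head? = some c := by
  cases xs with
  | nil =>
    show false = true ↔ ([] : List Char).head? = some c
    simp
  | cons b bs =>
    show (c == b && List.isPrefixOf [] bs) = true ↔ (b :: bs).head? = some c
    show (c == b && true) = true ↔ _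
    simp only [Bool.and_true, beq_iff_eq, List.head?_cons, Option.some.injEq]
    exact eq_comm

theorem pv_get0 (l : List Char) : l[0]? = l.head? := by
  cases l <;> simp

-- Chars.count on a singleton needle is List.count
theorem pv_count_go_singleton (c : Char) :
    ∀ (fuel : Nat) (l : List Char) (acc : Nat), l.length ≤ fuel →
      PySem.Chars.count.go [c] fuel l acc = acc + l.count c := by
  intro fuel
  induction fuel with
  | zero =>
    intro l acc h
    have : l = [] := List.eq_nil_of_length_eq_zero (Nat.le_zero.mp h)
    subst this
    simp [PySem.Chars.count.go]
  | succ n ih =>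
    intro l acc h
    cases l with
    | nil => simp [PySem.Chars.count.go]
    | cons x t =>
      show (if [c].isPrefixOf (x :: t) = true then
              PySem.Chars.count.go [c] n ((x :: t).drop 1) (acc + 1)
            else PySem.Chars.count.go [c] n t acc) = acc + (x :: t).count c
      simp only [List.length_cons, Nat.succ_le_succ_iff] at h
      by_cases hx : x = c
      · subst hx
        rw [if_pos (by simp [pv_prefix_singleton])]
        rw [List.drop_one, List.tail_cons, ih t (acc + 1) h]
        simp [List.count_cons]
        omega
      · rw [if_neg (by simp [pv_prefix_singleton]; exact fun hh => hx hh.symm)]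
        rw [ih t acc h]
        simp [List.count_cons, hx]

theorem pv_count_singleton (l : List Char) (c : Char) :
    PySem.Chars.count l [c] = l.count c := by
  show (if ([c] : List Char).isEmpty = true then l.length + 1
        else PySem.Chars.count.go [c] l.length l 0) = l.count c
  rw [if_neg (by simp)]
  rw [pv_count_go_singleton c l.length l 0 le_rfl]
  omega

-- rfind.go on a singleton needle returns the greatest index ≤ j holding c
theorem pv_rfind_go_pos (c : Char) (l : List Char) :
    ∀ (j k : Nat), k ≤ j → l[k]? = some c → (∀ i, k < i → i ≤ j → ¬ l[i]? = some c) →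
      PySem.Chars.rfind.go l [c] j = (k : Int) := by
  intro j
  induction j with
  | zero =>
    intro k hk hkc _
    interval_cases k
    show (if [c].isPrefixOf l = true then (0 : Int) else -1) = 0
    rw [if_pos]
    refine (pv_prefix_singleton c l).mpr ?_
    rw [← pv_get0]
    exact hkc
  | succ j ih =>
    intro k hk hkc hno
    show (if [c].isPrefixOf (l.drop (j + 1)) = true then ((j : Int) + 1) else PySem.Chars.rfind.go l [c] j) = k
    by_cases hkj : k = j + 1
    · subst hkj
      rw [if_pos]
      · push_cast; ring
      · refine (pv_prefix_singleton c _).mpr ?_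
        rw [← pv_get0, List.getElem?_drop]
        simpa using hkc
    · have hk' : k ≤ j := by omega
      rw [if_neg, ih k hk' hkc (fun i h1 h2 => hno i h1 (Nat.le_succ_of_le h2))]
      intro hp
      have := (pv_prefix_singleton c _).mp hp
      rw [← pv_get0, List.getElem?_drop] at this
      exact hno (j + 1) (by omega) le_rfl (by simpa using this)

-- the greatest index of c in l
def pvLastIdx (l : List Char) (c : Char) : Nat :=
  Nat.findGreatest (fun i => l[i]? = some c) l.length

theorem pv_lastIdx_spec (l : List Char) (c : Char) (h : c ∈ l) :
    l[pvLastIdx l c]? = some c ∧ (∀ i, pvLastIdx l c < i → ¬ l[i]? = some c) := by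
  obtain ⟨k0, hk0, hval⟩ := List.mem_iff_getElem.mp h
  have hP0 : l[k0]? = some c := by rw [List.getElem?_eq_getElem hk0, hval]
  constructor
  · exact Nat.findGreatest_spec (P := fun i => l[i]? = some c) (Nat.le_of_lt hk0) hP0
  · intro i hi hPi
    have hi_len : i < l.length := by
      by_contra hge
      rw [List.getElem?_eq_none (by omega)] at hPi
      simp at hPi
    exact Nat.findGreatest_is_greatest hi (Nat.le_of_lt hi_len) hPi

theorem pv_lastIdx_le (l : List Char) (c : Char) : pvLastIdx l c ≤ l.length :=
  Nat.findGreatest_le l.length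

theorem pv_lastIdx_ge (l : List Char) (c : Char) (k : Nat) (hk : l[k]? = some c) :
    k ≤ pvLastIdx l c := by
  have hlen : k < l.length := by
    by_contra hge
    rw [List.getElem?_eq_none (by omega)] at hk
    simp at hk
  exact Nat.le_findGreatest (Nat.le_of_lt hlen) hk

theorem pv_rfind_singleton (l : List Char) (c : Char) (h : c ∈ l) :
    PySem.Chars.rfind l [c] = (pvLastIdx l c : Int) := by
  obtain ⟨hmem, hgr⟩ := pv_lastIdx_spec l c h
  show PySem.Chars.rfind.go l [c] l.length = (pvLastIdx l c : Int)
  exact pv_rfind_go_pos c l l.length (pvLastIdx l c) (pv_lastIdx_le l c) hmem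
    (fun i h1 _ => hgr i h1)

-- the lexicographic (count, last index) order A maximises
def pvLe (l : List Char) (d b : Char) : Prop :=
  l.count d < l.count b ∨
    (l.count d = l.count b ∧ PySem.Chars.rfind l [d] ≤ PySem.Chars.rfind l [b])

def pvGood (l : List Char) (b : Char) : Prop := b ∈ l ∧ ∀ d ∈ l, pvLe l d b

theorem pv_le_trans (l : List Char) (a b c : Char) :
    pvLe l a b → pvLe l b c → pvLe l a c := by
  unfold pvLe; omega

theorem pv_good_unique (l : List Char) (b₁ b₂ : Char)
    (h₁ : pvGood l b₁) (h₂ : pvGood l b₂) : b₁ = b₂ := by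
  have h12 := h₁.2 b₂ h₂.1
  have h21 := h₂.2 b₁ h₁.1
  have hr : PySem.Chars.rfind l [b₁] = PySem.Chars.rfind l [b₂] := by
    unfold pvLe at h12 h21; omega
  rw [pv_rfind_singleton l b₁ h₁.1, pv_rfind_singleton l b₂ h₂.1] at hr
  have hk : pvLastIdx l b₁ = pvLastIdx l b₂ := by exact_mod_cast hr
  have e1 := (pv_lastIdx_spec l b₁ h₁.1).1
  have e2 := (pv_lastIdx_spec l b₂ h₂.1).1
  rw [hk, e2] at e1
  exact (Option.some.injEq _ _).mp e1.symm

-- condition decoding for A's update test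
theorem pv_cond_decode (l : List Char) (a ch : Char)
    (h : (l.count ch > l.count a || (l.count ch == l.count a &&
      decide (PySem.Chars.rfind l [ch] > PySem.Chars.rfind l [a]))) = true) :
    pvLe l a ch := by
  simp only [Bool.or_eq_true, decide_eq_true_eq, beq_iff_eq, Bool.and_eq_true] at h
  unfold pvLe; omega

theorem pv_cond_decode_neg (l : List Char) (a ch : Char)
    (h : ¬ (l.count ch > l.count a || (l.count ch == l.count a &&
      decide (PySem.Chars.rfind l [ch] > PySem.Chars.rfind l [a]))) = true) :
    pvLe l ch a := by
  simp only [Bool.or_eq_true, decide_eq_true_eq, beq_iff_eq, Bool.and_eq_true] at h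
  push_neg at h
  unfold pvLe; omega

-- evaluating A's loop body on the states the invariant maintains
theorem pvStep_eval (s : String) (a ch : Char) :
    pvStep s (s.toList.count a, String.ofList [a]) ch =
      if (s.toList.count ch > s.toList.count a || (s.toList.count ch == s.toList.count a &&
          decide (PySem.Chars.rfind s.toList [ch] > PySem.Chars.rfind s.toList [a]))) = true then
        (s.toList.count ch, String.ofList [ch])
      else (s.toList.count a, String.ofList [a]) := by
  unfold pvStep
  simp only [PySem.Str.count_eq, PySem.Str.rfind_eq, String.toList_ofList, pv_count_singleton]

theorem pvStep_init (s : String) (c : Char) (hc : c ∈ s.toList) :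
    pvStep s ((0 : Nat), "") c = (s.toList.count c, String.ofList [c]) := by
  unfold pvStep
  simp only [PySem.Str.count_eq, String.toList_ofList, pv_count_singleton]
  rw [if_pos]
  simp only [Bool.or_eq_true, decide_eq_true_eq]
  exact Or.inl (List.count_pos_iff.mpr hc)

-- A's loop, started from a seen character a, ends at the lexicographic maximum
theorem pv_foldA (s : String) :
    ∀ (l' : List Char) (a : Char), a ∈ s.toList → (∀ x ∈ l', x ∈ s.toList) →
      ∃ b, l'.foldl (pvStep s) (s.toList.count a, String.ofList [a])
        = (s.toList.count b, String.ofList [b]) ∧ b ∈ a :: l' ∧ ∀ d ∈ a :: l', pvLe s.toList d b := by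
  intro l'
  induction l' with
  | nil =>
    intro a ha _
    refine ⟨a, rfl, List.mem_singleton.mpr rfl, ?_⟩
    intro d hd
    rw [List.mem_singleton] at hd
    subst hd
    exact Or.inr ⟨rfl, le_rfl⟩
  | cons ch rest ih =>
    intro a ha hsub
    have hch : ch ∈ s.toList := hsub ch List.mem_cons_self
    have hrest : ∀ x ∈ rest, x ∈ s.toList := fun x hx => hsub x (List.mem_cons_of_mem ch hx)
    rw [List.foldl_cons, pvStep_eval]
    by_cases hc : (s.toList.count ch > s.toList.count a || (s.toList.count ch == s.toList.count a &&
        decide (PySem.Chars.rfind s.toList [ch] > PySem.Chars.rfind s.toList [a]))) = true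
    · rw [if_pos hc]
      obtain ⟨b, heq, hmem, hle⟩ := ih ch hch hrest
      refine ⟨b, heq, List.mem_cons_of_mem a hmem, ?_⟩
      intro d hd
      rcases List.mem_cons.mp hd with hda | hd'
      · subst hda
        exact pv_le_trans _ _ _ _ (pv_cond_decode _ _ _ hc) (hle ch List.mem_cons_self)
      · exact hle d hd'
    · rw [if_neg hc]
      obtain ⟨b, heq, hmem, hle⟩ := ih a ha hrest
      refine ⟨b, heq, ?_, ?_⟩
      · rcases List.mem_cons.mp hmem with hba | hbr
        · exact hba ▸ List.mem_cons_self
        · exact List.mem_cons_of_mem a (List.mem_cons_of_mem ch hbr)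
      · intro d hd
        rcases List.mem_cons.mp hd with hda | hd'
        · exact hle d (hda ▸ List.mem_cons_self)
        · rcases List.mem_cons.mp hd' with hdc | hdr
          · subst hdc
            exact pv_le_trans _ _ _ _ (pv_cond_decode_neg _ _ _ hc) (hle a List.mem_cons_self)
          · exact hle d (List.mem_cons_of_mem a hdr)

theorem pv_A_char (s : String) (c : Char) (t : List Char) (h : s.toList = c :: t) :
    ∃ b, most_repeating_last s = String.ofList [b] ∧ pvGood s.toList b := by
  have hc : c ∈ s.toList := h ▸ List.mem_cons_self
  obtain ⟨b, heq, hmem, hle⟩ := pv_foldA s t c hc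
    (fun x hx => h ▸ List.mem_cons_of_mem c hx)
  refine ⟨b, ?_, h ▸ hmem, fun d hd => hle d (h ▸ hd)⟩
  unfold most_repeating_last
  rw [h, List.foldl_cons, pvStep_init s c hc, heq]

theorem pv_A_nil (s : String) (h : s.toList = []) : most_repeating_last s = "" := by
  unfold most_repeating_last
  rw [h, List.foldl_nil]

theorem pv_B_nil (s : String) (h : s.toList = []) : most_repeating_last_alt s = "" := by
  unfold most_repeating_last_alt
  rw [h]
  rfl

theorem pv_B_char (s : String) (c : Char) (t : List Char) (h : s.toList = c :: t) :
    ∃ b, most_repeating_last_alt s = String.ofList [b] ∧ pvGood s.toList b := by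
  have hne : s.toList ≠ [] := by rw [h]; exact List.cons_ne_nil c t
  unfold most_repeating_last_alt
  rw [if_neg (by simp [List.isEmpty_iff, hne])]
  rw [PySem.Dict.foldl_insert_getD_add_one_eq_counter]
  -- values of the counter are the counts over the distinct characters
  have hvals : (PySem.Dict.counter s.toList).values
      = (PySem.Set.ofList s.toList).map (fun k => ((s.toList.count k : Int))) := by
    show (PySem.Dict.counter s.toList).items.map (·.2) = _
    rw [PySem.Dict.items_counter]
    simp [List.map_map, Function.comp]
  have hcne : c ∈ PySem.Set.ofList s.toList := (PySem.Set.mem_ofList _ _).mpr (h ▸ List.mem_cons_self)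
  have hvne : (PySem.Dict.counter s.toList).values ≠ [] := by
    rw [hvals]
    intro hemp
    rw [List.map_eq_nil_iff] at hemp
    rw [hemp] at hcne
    exact (List.not_mem_nil) hcne
  obtain ⟨m, hm⟩ : ∃ m, PySem.List.max? (PySem.Dict.counter s.toList).values (fun v => v) = some m := by
    cases hE : PySem.List.max? (PySem.Dict.counter s.toList).values (fun v => v) with
    | none => exact absurd ((PySem.List.max?_eq_none_iff _ _).mp hE) hvne
    | some m => exact ⟨m, rfl⟩
  · have hmax : ∀ d ∈ s.toList, (s.toList.count d : Int) ≤ m := by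
      intro d hd
      have : ((s.toList.count d : Int)) ∈ (PySem.Dict.counter s.toList).values := by
        rw [hvals]
        exact List.mem_map.mpr ⟨d, (PySem.Set.mem_ofList _ _).mpr hd, rfl⟩
      exact PySem.List.max?_isMax hm _ this
    -- m is attained
    have hmem_m : m ∈ (PySem.Dict.counter s.toList).values := PySem.List.max?_mem hm
    rw [hvals] at hmem_m
    obtain ⟨k0, hk0mem, hk0⟩ := List.mem_map.mp hmem_m
    have hk0l : k0 ∈ s.toList := (PySem.Set.mem_ofList _ _).mp hk0mem
    -- the reverse scan finds some character
    simp only [PySem.Dict.getD_counter]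
    have hsome : (s.toList.reverse.find? (fun ch => ((s.toList.count ch : Int)) == m)).isSome := by
      rw [List.find?_isSome]
      exact ⟨k0, List.mem_reverse.mpr hk0l, by rw [hk0]; exact beq_self_eq_true m⟩
    obtain ⟨b, hfind⟩ : ∃ b, s.toList.reverse.find? (fun ch => ((s.toList.count ch : Int)) == m) = some b := by
      cases hF : s.toList.reverse.find? (fun ch => ((s.toList.count ch : Int)) == m) with
      | none => rw [hF] at hsome; exact absurd hsome (by simp)
      | some b => exact ⟨b, rfl⟩
    · obtain ⟨hpb, as, bs, hsplit, hno⟩ := List.find?_eq_some_iff_append.mp hfind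
      have hpb' : (s.toList.count b : Int) = m := by exact_mod_cast beq_iff_eq.mp hpb
      have hl : s.toList = bs.reverse ++ b :: as.reverse := by
        have := congrArg List.reverse hsplit
        simpa [List.reverse_append] using this
      have hkb : s.toList[bs.length]? = some b := by
        rw [hl, List.getElem?_append_right (by simp)]
        simp
      have hbl : b ∈ s.toList := List.mem_of_getElem? hkb
      -- indices above bs.length carry only characters failing the count-= m test
      have habove : ∀ i d, bs.length < i → s.toList[i]? = some d → (s.toList.count d : Int) ≠ m := by
        intro i d hi hval
        rw [hl, List.getElem?_append_right (by simp; omega)] at hval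
        have hlen : i - bs.reverse.length ≥ 1 := by simp; omega
        rw [List.getElem?_cons] at hval
        rw [if_neg (by omega)] at hval
        have hdmem : d ∈ as.reverse := List.mem_of_getElem? hval
        have := hno d (List.mem_reverse.mp hdmem)
        simpa using this
      refine ⟨b, ?_, hbl, ?_⟩
      · rw [hm]
        show (match s.toList.reverse.find? (fun ch => ((s.toList.count ch : Int)) == m) with
          | some ch => String.ofList [ch]
          | none => "") = String.ofList [b]
        rw [hfind]
      intro d hd
      by_cases hcnt : s.toList.count d = s.toList.count b
      · refine Or.inr ⟨hcnt, ?_⟩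
        rw [pv_rfind_singleton _ d hd, pv_rfind_singleton _ b hbl]
        have hdm : (s.toList.count d : Int) = m := by rw [hcnt]; exact hpb'
        have hdle : pvLastIdx s.toList d ≤ bs.length := by
          by_contra hgt
          exact habove (pvLastIdx s.toList d) d (by omega) (pv_lastIdx_spec _ d hd).1 hdm
        have hble : bs.length ≤ pvLastIdx s.toList b := pv_lastIdx_ge _ b bs.length hkb
        exact_mod_cast Nat.le_trans hdle hble
      · left
        have := hmax d hd
        rw [← hpb'] at this
        have : s.toList.count d ≤ s.toList.count b := by exact_mod_cast this
        omega

-- ===== VERDICT (by name: the statement is the Claim_ definition above) =====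
theorem most_repeating_last_spec : Claim_equal_most_repeating_last := by
  intro s _
  unfold Spec_most_repeating_last
  cases h : s.toList with
  | nil => rw [pv_A_nil s h, pv_B_nil s h]
  | cons c t =>
    obtain ⟨b₁, hA, hG₁⟩ := pv_A_char s c t h
    obtain ⟨b₂, hB, hG₂⟩ := pv_B_char s c t h
    rw [hA, hB, pv_good_unique s.toList b₁ b₂ hG₁ hG₂]
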